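-- pv_equiv track=rewrite | github.com/mpaguilar/resume_editor | resume_editor/app/api/routes/route_logic/resume_serialization_helpers.py | _scan_section_for_content
-- ===== SOURCE A (Python) =====
-- def _is_section_start(line: str, section_header: str) -> bool:
--     """Check if line is the section header.
--
--     Args:
--         line (str): The line to check.
--         section_header (str): The section header to match.
--
--     Returns:
--         bool: True if line matches section header.
--
--     """
--     return line.strip().lower() == section_header
--
-- def _is_next_section(line: str) -> bool:
--     """Check if line is the start of a new section.
--
--     Args:
--         line (str): The line to check.
--
--     Returns:
--         bool: True if line starts a new section.
--
--     """
--     return line.strip().lower().startswith("# ")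
--
-- def _scan_section_for_content(lines: list[str], section_header: str) -> bool:
--     """Scan lines for content within a specific section.
--
--     Args:
--         lines (list[str]): The content lines to search.
--         section_header (str): The section header to find.
--
--     Returns:
--         bool: True if content is found in the section.
--
--     Notes:
--         1. Iterate through lines to find the section header.
--         2. Once inside the section, check for any non-empty lines before next section.
--         3. Return True if content is found, False otherwise.
--
--     """
--     in_section = False
--
--     for line in lines:
--         if not in_section:
--             in_section = _is_section_start(line, section_header)
--         elif _is_next_section(line):
--             break
--         elif line.strip():
--             return True
--
--     return False
-- ===== SOURCE B (Python) =====
-- def _scan_section_for_content(lines: list[str], section_header: str) -> bool: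
--     # Two-phase: normalize all lines once, locate the header by index,
--     # slice out the section body up to the next "# " header, then scan it.
--     norm = [line.strip().lower() for line in lines]
--     try:
--         idx = norm.index(section_header)
--     except ValueError:
--         return False
--     body = norm[idx + 1:]
--     stop = next((j for j, s in enumerate(body) if s.startswith("# ")), len(body))
--     return any(s for s in body[:stop])
-- ===== Notes on version B (the rewrite author's own statement) =====
-- stated objective: alternative
-- what changed: Replaces A's single stateful loop (in_section flag with early return) by a two-phase locate-then-slice decomposition: normalize all lines once, find the header index with list.index, slice the body up to the next '# ' header, and test it with any().
import Mathlib
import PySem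

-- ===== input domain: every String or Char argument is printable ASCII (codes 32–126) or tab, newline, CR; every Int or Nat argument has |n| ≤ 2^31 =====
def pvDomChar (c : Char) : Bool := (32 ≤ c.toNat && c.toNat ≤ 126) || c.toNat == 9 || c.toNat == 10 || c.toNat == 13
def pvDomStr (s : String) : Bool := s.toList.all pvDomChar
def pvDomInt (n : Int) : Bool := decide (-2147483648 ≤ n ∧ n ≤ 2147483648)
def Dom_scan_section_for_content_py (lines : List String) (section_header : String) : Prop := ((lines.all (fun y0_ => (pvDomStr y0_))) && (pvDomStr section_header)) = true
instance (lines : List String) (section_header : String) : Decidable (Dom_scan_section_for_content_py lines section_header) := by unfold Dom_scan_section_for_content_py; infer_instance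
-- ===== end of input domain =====

-- B replaces A's single stateful loop by a locate-then-slice two-phase scan; same return value everywhere.

-- ===== PORT A =====
-- _is_section_start
def pvIsStart (line section_header : String) : Bool :=
  PySem.Str.lower (PySem.Str.strip line) == section_header

-- _is_next_section
def pvIsNext (line : String) : Bool :=
  PySem.Str.startswith (PySem.Str.lower (PySem.Str.strip line)) "# "

-- the for-loop of A, with the in_section flag as state; returning false models both
-- the break and falling off the loop (both paths return False in A)
def pvScanA (section_header : String) : List String → Bool → Bool
  | [], _ => false
  | l :: ls, inSec =>
    if !inSec then pvScanA section_header ls (pvIsStart l section_header)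
    else if pvIsNext l then false
    else if PySem.Str.strip l != "" then true
    else pvScanA section_header ls inSec

def scan_section_for_content_py (lines : List String) (section_header : String) : Bool :=
  pvScanA section_header lines false

-- ===== PORT B =====
def scan_section_for_content_py_alt (lines : List String) (section_header : String) : Bool :=
  let norm := lines.map (fun line => PySem.Str.lower (PySem.Str.strip line))
  match PySem.List.index? norm section_header with
  | none => false
  | some idx =>
    let body := PySem.List.slice norm (some ((idx : Int) + 1)) none
    -- next((j for j, s in enumerate(body) if s.startswith("# ")), len(body))
    let stop : Nat :=
      match body.findIdx? (fun s => PySem.Str.startswith s "# ") with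
      | some j => j
      | none => body.length
    (PySem.List.slice body none (some ((stop : Nat) : Int))).any (fun s => s != "")

-- ===== PRECONDITION & SPEC =====
def Spec_scan_section_for_content_py (lines : List String) (section_header : String) (out : Bool) : Prop := out = scan_section_for_content_py_alt lines section_header
instance (lines : List String) (section_header : String) (out : Bool) : Decidable (Spec_scan_section_for_content_py lines section_header out) := by unfold Spec_scan_section_for_content_py; infer_instance

-- ===== CLAIM (what is proved, stated in full; the proofs are below) =====
def Claim_equal_scan_section_for_content_py : Prop := ∀ (lines : List String) (section_header : String), Dom_scan_section_for_content_py lines section_header → Spec_scan_section_for_content_py lines section_header (scan_section_for_content_py lines section_header)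

-- ===== LEMMAS AND PROOFS =====

theorem pv_take_stop {α : Type} (p : α → Bool) (body : List α) :
    body.take (match body.findIdx? p with | some j => j | none => body.length)
      = body.takeWhile (fun s => !p s) := by
  induction body with
  | nil => simp
  | cons b bs ih =>
    rw [List.findIdx?_cons]
    by_cases hb : p b
    · simp [hb]
    · simp only [hb, Bool.false_eq_true, if_false, List.takeWhile_cons, Bool.not_false, if_true]
      cases h : bs.findIdx? p with
      | none => rw [h] at ih; simpa using ih
      | some j => rw [h] at ih; simpa using ih

theorem pv_lower_eq_empty (s : String) : (PySem.Str.lower s = "") ↔ (s = "") := by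
  rw [← String.toList_inj, ← String.toList_inj, PySem.Str.toList_lower]
  simp [PySem.Chars.lower]

theorem pv_scanA_true (h : String) (ls : List String) :
    pvScanA h ls true
      = ((ls.map (fun l => PySem.Str.lower (PySem.Str.strip l))).takeWhile
          (fun s => !PySem.Str.startswith s "# ")).any (fun s => s != "") := by
  induction ls with
  | nil => rfl
  | cons l ls ih =>
    rw [pvScanA, List.map_cons, List.takeWhile_cons]
    simp only [Bool.not_true, Bool.false_eq_true, if_false]
    by_cases hb : PySem.Str.startswith (PySem.Str.lower (PySem.Str.strip l)) "# "
    · simp only [pvIsNext, hb, if_true, Bool.not_true, Bool.false_eq_true, if_false,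
        List.any_nil]
    · rw [Bool.not_eq_true] at hb
      simp only [pvIsNext, hb, Bool.false_eq_true, if_false, Bool.not_false, if_true,
        List.any_cons]
      by_cases hs : PySem.Str.strip l = ""
      · have hn : PySem.Str.lower (PySem.Str.strip l) = "" := (pv_lower_eq_empty _).mpr hs
        have he : PySem.Str.lower "" = "" := (pv_lower_eq_empty _).mpr rfl
        simp only [hs, he, bne_self_eq_false, Bool.false_eq_true, if_false, Bool.false_or, ih]
      · have hn : PySem.Str.lower (PySem.Str.strip l) ≠ "" :=
          fun c => hs ((pv_lower_eq_empty _).mp c)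
        have hb2 : (PySem.Str.lower (PySem.Str.strip l) != "") = true := bne_iff_ne.mpr hn
        have hs2 : (PySem.Str.strip l != "") = true := bne_iff_ne.mpr hs
        simp only [hs2, if_true, hb2, Bool.true_or]

theorem pv_scanA_false (h : String) (ls : List String) :
    pvScanA h ls false
      = (match PySem.List.index? (ls.map (fun l => PySem.Str.lower (PySem.Str.strip l))) h with
         | none => false
         | some idx =>
           (((ls.map (fun l => PySem.Str.lower (PySem.Str.strip l))).drop (idx + 1)).takeWhile
             (fun s => !PySem.Str.startswith s "# ")).any (fun s => s != "")) := by
  induction ls with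
  | nil => rfl
  | cons l ls ih =>
    rw [pvScanA, List.map_cons]
    simp only [Bool.not_false, if_true]
    by_cases hq : PySem.Str.lower (PySem.Str.strip l) = h
    · have hstart : pvIsStart l h = true := by
        simp only [pvIsStart, hq, beq_self_eq_true]
      rw [hstart, hq, PySem.List.index?_cons_self]
      simp only [List.drop_succ_cons, List.drop_zero]
      exact pv_scanA_true h ls
    · have hstart : pvIsStart l h = false := by
        simp only [pvIsStart]; exact beq_eq_false_iff_ne.mpr hq
      rw [hstart]
      rw [PySem.List.index?_cons_of_ne _ hq]
      cases hidx : PySem.List.index? (ls.map (fun l => PySem.Str.lower (PySem.Str.strip l))) h with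
      | none => rw [hidx] at ih; simpa using ih
      | some k =>
        rw [hidx] at ih
        simpa using ih


-- ===== VERDICT (by name: the statement is the Claim_ definition above) =====
theorem scan_section_for_content_py_spec : Claim_equal_scan_section_for_content_py := by
  intro lines h _
  unfold Spec_scan_section_for_content_py scan_section_for_content_py scan_section_for_content_py_alt
  rw [pv_scanA_false]
  cases hidx : PySem.List.index? (lines.map (fun l => PySem.Str.lower (PySem.Str.strip l))) h with
  | none => simp only [hidx]
  | some idx =>
    simp only [hidx]
    have h1 : PySem.List.slice (lines.map (fun l => PySem.Str.lower (PySem.Str.strip l)))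
        (some ((idx : Int) + 1)) none
        = (lines.map (fun l => PySem.Str.lower (PySem.Str.strip l))).drop (idx + 1) := by
      have := PySem.List.slice_from_natCast (lines.map (fun l => PySem.Str.lower (PySem.Str.strip l))) (idx + 1)
      push_cast at this
      exact this
    rw [h1]
    have h2 := PySem.List.slice_to_natCast
      ((lines.map (fun l => PySem.Str.lower (PySem.Str.strip l))).drop (idx + 1))
      (match ((lines.map (fun l => PySem.Str.lower (PySem.Str.strip l))).drop (idx + 1)).findIdx?
          (fun s => PySem.Str.startswith s "# ") with
       | some j => j
       | none => ((lines.map (fun l => PySem.Str.lower (PySem.Str.strip l))).drop (idx + 1)).length)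
    rw [h2, pv_take_stop]
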